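-- pv_equiv track=rewrite | github.com/esxmod/programmers | level2/다리를 지나는 트럭.py | solution
-- ===== SOURCE A (Python) =====
-- def solution(bridge_length, weight, truck_weights):
--     # 문제 조건을 이해하기 다소 어려운데
--     # bridge_length 가 다리 길이가 아닌 다리에 올라갈 수 있는 트럭 수로 나온다.
--     # 이는 다리가 일차선이기 때문에 1자로 나열했다고 보면 된다.
--     # 또한 두번째 예시(100, 100, [10])로 판단했을 때
--     # 건너는 소요 시간을 다리 길이 + 1 초로 정의할 수 있다.
--
--     # 다리가 먼저 들어가고 먼저 나가는 구조이므로
--     # 이를 하나의 큐 라고 표현할 수 있다.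
--
--     # bridge_length 길이 만큼의 다리 생성
--     bridge = [0] * bridge_length
--
--     # 소요 시간
--     answer = 0
--
--     # truck: [7, 4, 5, 6]
--
--     # 이동 방향 -->
--     # 0 [0, 0]
--     # 1 [7, 0]
--     # 2 [0, 7]
--     # 3 [4, 0]
--     # 4 [5, 4]
--     # 5 [0, 5]
--     # 6 [6, 0]
--     # 7 [6]
--     # 8 []
--
--     # 구현하는데 있어 이동 방향은 관계없고
--     # queue 가 제일 적절하나 데이터가 많지 않은 관계상 list 로 구현함
--     total_weight = 0
--
--     # 다리위의 총 중량을 구할 때 매번 sum 을 처리하는 것 보다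
--     # 슬라이딩 윈도우 개념을 이용하여 처리하는 것이 효율적이다.
--     while len(bridge):
--         # 1. 나옴
--         total_weight -= bridge.pop(0)  # shift
--
--         # 2. 들어감
--
--         # 지나가야할 트럭이 남아 있다면
--         if len(truck_weights):
--             # 다리위의 총 중량 + 들어갈 트럭 무게 <= 다리가 견딜 수 있는 무게인 경우
--             if total_weight + truck_weights[0] <= weight:
--                 truck = truck_weights.pop(0)  # shift
--                 total_weight += truck
--                 bridge.append(truck)
--             # 트럭의 이동을 구현하기 위해 아래와 같이 무게가 0인 개념으로 처리한다.
--             else: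
--                 bridge.append(0)
--
--         answer += 1
--
--     return answer
-- ===== SOURCE B (Python) =====
-- def solution(bridge_length, weight, truck_weights):
--     # Event-driven simulation: jump the clock between truck entries instead of
--     # ticking second by second (a different algorithm, same returned value). (Return-value equivalence only: A empties the
--     # truck_weights list in place; B does not mutate it.)
--     if bridge_length <= 0:
--         return 0
--     q = []       # (entry_time, weight) of trucks on the bridge; live part is q[head:]
--     head = 0
--     cur = 0      # total weight currently on the bridge
--     t = 0        # entry time of the last truck that entered
--     for w in truck_weights:
--         t += 1
--         # trucks that have left the bridge by time t
--         while head < len(q) and q[head][0] + bridge_length <= t: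
--             cur -= q[head][1]
--             head += 1
--         # too heavy: jump the clock to successive exit events
--         while cur + w > weight:
--             e, ew = q[head]
--             head += 1
--             cur -= ew
--             t = e + bridge_length
--         cur += w
--         q.append((t, w))
--     return t + bridge_length
-- ===== Notes on version B (the rewrite author's own statement) =====
-- stated objective: alternative
-- what changed: Replaces the second-by-second bridge-list simulation (pop(0)/append each simulated second) by an event-driven simulation over the trucks that keeps a sliding window of (entry_time, weight) pairs and jumps the clock directly to the next exit event when a truck does not fit; the returned total time is identical.
-- outside the precondition, e.g. on solution(2, 5, [7]): A does not finish within the time limit, B raises IndexError; on solution(2, 0, [-5, 1]): A returns 4, B returns 4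
import Mathlib
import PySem

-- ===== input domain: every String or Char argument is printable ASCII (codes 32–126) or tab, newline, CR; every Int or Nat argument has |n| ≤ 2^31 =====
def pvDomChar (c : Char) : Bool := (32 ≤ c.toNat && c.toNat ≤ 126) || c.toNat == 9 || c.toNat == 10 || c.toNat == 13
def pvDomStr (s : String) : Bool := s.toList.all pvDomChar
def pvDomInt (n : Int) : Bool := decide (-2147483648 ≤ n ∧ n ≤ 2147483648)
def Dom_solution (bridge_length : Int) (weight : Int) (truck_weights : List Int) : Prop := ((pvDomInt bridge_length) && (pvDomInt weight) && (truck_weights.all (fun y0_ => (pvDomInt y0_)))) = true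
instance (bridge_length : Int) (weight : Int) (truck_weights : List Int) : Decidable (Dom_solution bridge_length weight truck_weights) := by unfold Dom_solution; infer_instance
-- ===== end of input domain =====

-- B replaces A's second-by-second bridge-list simulation by an event-driven simulation
-- over the trucks (objective: alternative). Return-value equivalence only: the Python A
-- empties truck_weights in place, B does not mutate it.

-- ===== PORT A =====
-- A's `while len(bridge)` loop, step for step; the Nat fuel argument only makes the
-- same computation total (on Pre_ inputs the fuel chosen below is never exhausted).
def solutionLoop (weight : Int) : Nat → List Int → List Int → Int → Int → Int
  | 0, _, _, _, answer => answer
  | _ + 1, [], _, _, answer => answer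
  | fuel + 1, b0 :: rest, trucks, total_weight, answer =>
    let total1 := total_weight - b0
    match trucks with
    | [] => solutionLoop weight fuel rest [] total1 (answer + 1)
    | t0 :: ts =>
      if total1 + t0 ≤ weight then
        solutionLoop weight fuel (rest ++ [t0]) ts (total1 + t0) (answer + 1)
      else
        solutionLoop weight fuel (rest ++ [0]) (t0 :: ts) total1 (answer + 1)

def solution (bridge_length : Int) (weight : Int) (truck_weights : List Int) : Int :=
  -- bridge = [0] * bridge_length; total_weight = 0; answer = 0
  solutionLoop weight (truck_weights.length * bridge_length.toNat + bridge_length.toNat + 1)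
    (List.replicate bridge_length.toNat 0) truck_weights 0 0

-- ===== PORT B =====
-- `while head < len(q) and q[head][0] + bridge_length <= t: ...` (drop exited trucks)
def bDrop (L t : Int) : List (Int × Int) → Int → List (Int × Int) × Int
  | [], cur => ([], cur)
  | (e, ew) :: rest, cur =>
    if e + L ≤ t then bDrop L t rest (cur - ew) else ((e, ew) :: rest, cur)

-- `while cur + w > weight: ...` (jump the clock to successive exit events)
def bJump (L W w : Int) (q : List (Int × Int)) (cur t : Int) : List (Int × Int) × Int × Int :=
  if cur + w ≤ W then (q, cur, t)
  else
    match q with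
    | [] => ([], cur, t)   -- unreachable under Pre_ (the Python B raises IndexError here)
    | (e, ew) :: rest => bJump L W w rest (cur - ew) (e + L)
  termination_by q

-- `for w in truck_weights: ...`; returns the final clock t
def bLoop (L W : Int) : List Int → List (Int × Int) → Int → Int → Int
  | [], _, _, t => t
  | w :: ts, q, cur, t =>
    let p1 := bDrop L (t + 1) q cur
    let p2 := bJump L W w p1.1 p1.2 (t + 1)
    bLoop L W ts (p2.1 ++ [(p2.2.2, w)]) (p2.2.1 + w) p2.2.2

def solution_alt (bridge_length : Int) (weight : Int) (truck_weights : List Int) : Int :=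
  if bridge_length ≤ 0 then 0
  else bLoop bridge_length weight truck_weights [] 0 0 + bridge_length

-- ===== PRECONDITION & SPEC =====
-- Pre_ excludes the inputs with a positive bridge length and a truck heavier than
-- `weight`: there the Python A's while-loop almost always runs forever because that
-- truck can never enter (the Python B raises IndexError), and in the remaining corner
-- (a negative-weight truck already on the bridge lets the heavy truck board) both
-- programs return the same value anyway.
def Pre_solution (bridge_length : Int) (weight : Int) (truck_weights : List Int) : Prop :=
  bridge_length ≤ 0 ∨ ∀ x ∈ truck_weights, x ≤ weight
instance (bridge_length : Int) (weight : Int) (truck_weights : List Int) : Decidable (Pre_solution bridge_length weight truck_weights) := by unfold Pre_solution; infer_instance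

def pvWitness_solution : Int × Int × List Int := (2, 10, [7, 4, 5, 6])

def Spec_solution (bridge_length : Int) (weight : Int) (truck_weights : List Int) (out : Int) : Prop := out = solution_alt bridge_length weight truck_weights
instance (bridge_length : Int) (weight : Int) (truck_weights : List Int) (out : Int) : Decidable (Spec_solution bridge_length weight truck_weights out) := by unfold Spec_solution; infer_instance

-- ===== CLAIM (what is proved, stated in full; the proofs are below) =====
def Claim_equal_solution : Prop := ∀ (bridge_length : Int) (weight : Int) (truck_weights : List Int), Dom_solution bridge_length weight truck_weights → Pre_solution bridge_length weight truck_weights → Spec_solution bridge_length weight truck_weights (solution bridge_length weight truck_weights)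

-- ===== LEMMAS AND PROOFS =====

-- weight of the truck that entered the bridge at second e (0 if none)
def wAt (q : List (Int × Int)) (e : Int) : Int :=
  ((q.find? (fun p => p.1 == e)).map Prod.snd).getD 0

-- A's bridge list reconstructed from B's event queue at the start of second t+1
def bridgeOf (q : List (Int × Int)) (L t : Int) : List Int :=
  (List.range L.toNat).map (fun i : Nat => wAt q (t + 1 - L + (i : Int)))

-- potential: an upper bound on the seconds until the bridge is certainly empty again
def gapF (q : List (Int × Int)) (L t : Int) : Nat :=
  match q.getLast? with
  | none => 1
  | some p => (p.1 + L - t).toNat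

lemma wAt_nil (e : Int) : wAt [] e = 0 := rfl

lemma wAt_cons_ne {a : Int × Int} {q : List (Int × Int)} {e : Int} (h : a.1 ≠ e) :
    wAt (a :: q) e = wAt q e := by
  obtain ⟨a1, a2⟩ := a
  simp at h
  simp [wAt, h]

lemma wAt_cons_self (e w : Int) (q : List (Int × Int)) : wAt ((e, w) :: q) e = w := by
  simp [wAt]

lemma wAt_none {q : List (Int × Int)} {e : Int} (h : ∀ p ∈ q, p.1 ≠ e) : wAt q e = 0 := by
  have : q.find? (fun p => p.1 == e) = none := by
    apply List.find?_eq_none.2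
    intro p hp
    simpa using h p hp
  simp [wAt, this]

lemma wAt_snoc_ne {q : List (Int × Int)} {s e w : Int} (h : e ≠ s) :
    wAt (q ++ [(s, w)]) e = wAt q e := by
  induction q with
  | nil =>
    rw [List.nil_append, wAt_none (by simpa using fun hh => (h hh.symm).elim)]
    rfl
  | cons a q ih =>
    by_cases ha : a.1 = e
    · obtain ⟨a1, a2⟩ := a
      subst ha
      simp [wAt]
    · rw [List.cons_append, wAt_cons_ne ha, wAt_cons_ne ha, ih]

lemma wAt_snoc_self {q : List (Int × Int)} {s w : Int} (h : ∀ p ∈ q, p.1 ≠ s) :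
    wAt (q ++ [(s, w)]) s = w := by
  induction q with
  | nil => simp [wAt]
  | cons a q ih =>
    rw [List.cons_append, wAt_cons_ne (h a (by simp)), ih (fun p hp => h p (by simp [hp]))]

lemma bridgeOf_nil (L t : Int) : bridgeOf [] L t = List.replicate L.toNat 0 := by
  simp [bridgeOf, wAt]

lemma bridgeOf_length (q : List (Int × Int)) (L t : Int) :
    (bridgeOf q L t).length = L.toNat := by
  simp [bridgeOf]

lemma bridge_cons {L : Int} (hL : 1 ≤ L) (q : List (Int × Int)) (t : Int) :
    bridgeOf q L t
      = wAt q (t + 1 - L) :: (List.range (L.toNat - 1)).map (fun i : Nat => wAt q (t + 2 - L + (i : Int))) := by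
  obtain ⟨n, hn⟩ : ∃ n, L.toNat = n + 1 := ⟨L.toNat - 1, by omega⟩
  rw [bridgeOf, hn, List.range_succ_eq_map, List.map_cons, List.map_map]
  refine congrArg₂ _ (by norm_num) ?_
  simp only [Nat.add_sub_cancel]
  apply List.map_congr_left
  intro i _
  simp [Function.comp]
  congr 1
  ring

lemma bridge_shift {L : Int} (hL : 1 ≤ L) (q q' : List (Int × Int)) (t v : Int)
    (hagree : ∀ e : Int, t + 1 - L < e → e ≤ t → wAt q' e = wAt q e)
    (hlast : wAt q' (t + 1) = v) :
    (List.range (L.toNat - 1)).map (fun i : Nat => wAt q (t + 2 - L + (i : Int))) ++ [v]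
      = bridgeOf q' L (t + 1) := by
  obtain ⟨n, hn⟩ : ∃ n, L.toNat = n + 1 := ⟨L.toNat - 1, by omega⟩
  have hnL : (n : Int) = L - 1 := by
    have := Int.toNat_of_nonneg (le_trans (by norm_num) hL)
    omega
  rw [bridgeOf, hn, List.range_succ, List.map_append, List.map_singleton]
  have h1 : (List.range n).map (fun i : Nat => wAt q' (t + 1 + 1 - L + (i : Int)))
      = (List.range n).map (fun i : Nat => wAt q (t + 2 - L + (i : Int))) := by
    apply List.map_congr_left
    intro i hi
    have hi' : i < n := List.mem_range.1 hi
    have harg : t + 1 + 1 - L + (i : Int) = t + 2 - L + (i : Int) := by ring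
    rw [harg]
    apply hagree <;> omega
  rw [h1]
  have h2 : t + 1 + 1 - L + (n : Int) = t + 1 := by omega
  rw [h2, hlast]
  simp

lemma bDrop_stop {L t cur : Int} {q : List (Int × Int)} (h : ∀ p ∈ q, ¬ (p.1 + L ≤ t)) :
    bDrop L t q cur = (q, cur) := by
  cases q with
  | nil => rfl
  | cons a rest =>
    obtain ⟨e, ew⟩ := a
    rw [bDrop]
    simp [h (e, ew) (by simp)]

-- bDrop at second t+1 under the queue invariant pops at most the front entry
-- (the unique one whose exit time is exactly t+1)
lemma bDrop_props {L t cur : Int} {q : List (Int × Int)}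
    (hp : List.Pairwise (fun a b => a.1 < b.1) q)
    (hb : ∀ p ∈ q, t - L < p.1 ∧ p.1 ≤ t)
    (hs : cur = (q.map Prod.snd).sum) :
    (bDrop L (t + 1) q cur).2 = cur - wAt q (t + 1 - L) ∧
    (∀ e : Int, e ≠ t + 1 - L → wAt (bDrop L (t + 1) q cur).1 e = wAt q e) ∧
    List.Pairwise (fun a b => a.1 < b.1) (bDrop L (t + 1) q cur).1 ∧
    (∀ p ∈ (bDrop L (t + 1) q cur).1, (t + 1) - L < p.1 ∧ p.1 ≤ t) ∧
    (bDrop L (t + 1) q cur).2 = ((bDrop L (t + 1) q cur).1.map Prod.snd).sum ∧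
    ((bDrop L (t + 1) q cur).1 ≠ [] → (bDrop L (t + 1) q cur).1.getLast? = q.getLast?) := by
  cases q with
  | nil =>
    simp [bDrop, wAt_nil, hs]
  | cons a rest =>
    obtain ⟨e, ew⟩ := a
    have hrest : ∀ p ∈ rest, e < p.1 := by
      intro p hp'
      exact (List.pairwise_cons.1 hp).1 p hp'
    by_cases hc : e + L ≤ t + 1
    · have he : e = t + 1 - L := by
        have := (hb (e, ew) (by simp)).1
        omega
      have hstep : bDrop L (t + 1) ((e, ew) :: rest) cur = (rest, cur - ew) := by
        rw [bDrop, if_pos hc]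
        exact bDrop_stop (by intro p hp'; have := hrest p hp'; omega)
      rw [hstep]
      subst he
      refine ⟨by rw [wAt_cons_self], ?_, (List.pairwise_cons.1 hp).2, ?_, ?_, ?_⟩
      · intro x hx
        exact (wAt_cons_ne (Ne.symm hx)).symm
      · intro p hp'
        exact ⟨by have := hrest p hp'; omega, (hb p (by simp [hp'])).2⟩
      · simp at hs
        simp [hs]
      · intro hne
        cases rest with
        | nil => simp at hne
        | cons b l => rw [List.getLast?_cons_cons]
    · have hnone : wAt ((e, ew) :: rest) (t + 1 - L) = 0 := by
        apply wAt_none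
        intro p hp'
        rcases List.mem_cons.1 hp' with h | h
        · subst h; exact (by omega : e ≠ t + 1 - L)
        · have h1 := hrest p h; have h2 := (hb (e, ew) (by simp)).1
          exact (by simp only at h2; omega : p.1 ≠ t + 1 - L)
      have hstep : bDrop L (t + 1) ((e, ew) :: rest) cur = ((e, ew) :: rest, cur) := by
        rw [bDrop, if_neg hc]
      rw [hstep, hnone]
      refine ⟨by ring, fun _ _ => rfl, hp, ?_, hs, fun _ => rfl⟩
      intro p hp'
      rcases List.mem_cons.1 hp' with h | h
      · subst h
        exact ⟨(by omega : t + 1 - L < e), (hb (e, ew) (by simp)).2⟩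
      · have := hrest p h
        have := (hb (e, ew) (by simp)).1
        exact ⟨by omega, (hb p (by simp [h])).2⟩

lemma solutionLoop_drain (W : Int) (b : List Int) :
    ∀ (fuel : Nat) (total ans : Int), b.length ≤ fuel →
      solutionLoop W fuel b [] total ans = ans + b.length := by
  induction b with
  | nil =>
    intro fuel total ans _
    cases fuel <;> simp [solutionLoop]
  | cons x rest ih =>
    intro fuel total ans hf
    obtain ⟨f, rfl⟩ : ∃ f, fuel = f + 1 := ⟨fuel - 1, by simp at hf; omega⟩
    rw [solutionLoop, ih f _ _ (by simp at hf ⊢; omega)]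
    simp
    ring

lemma getLast?_mem {α : Type} {l : List α} {a : α} (h : l.getLast? = some a) : a ∈ l := by
  cases l with
  | nil => simp at h
  | cons x xs => exact List.mem_of_mem_getLast? h

-- main bisimulation: A's per-second loop, run on the bridge list reconstructed from
-- B's event queue, returns B's final clock plus the bridge length
lemma sim (W L : Int) (hL : 1 ≤ L) :
    ∀ (fuel : Nat) (trucks : List Int) (q : List (Int × Int)) (cur t : Int),
      List.Pairwise (fun a b => a.1 < b.1) q →
      (∀ p ∈ q, t - L < p.1 ∧ p.1 ≤ t) →
      cur = (q.map Prod.snd).sum →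
      (∀ x ∈ trucks, x ≤ W) →
      trucks.length * L.toNat + gapF q L t + L.toNat ≤ fuel →
      solutionLoop W fuel (bridgeOf q L t) trucks cur t = bLoop L W trucks q cur t + L := by
  intro fuel
  have hLt : 1 ≤ L.toNat := by omega
  induction fuel with
  | zero =>
    intro trucks q cur t _ _ _ _ hf
    exfalso; omega
  | succ f ih =>
    intro trucks q cur t hp hb hs htr hf
    have hgap1 : 1 ≤ gapF q L t := by
      unfold gapF
      cases hql : q.getLast? with
      | none => simp
      | some p =>
        have := (hb p (getLast?_mem hql)).1
        simp; omega
    cases trucks with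
    | nil =>
      rw [bLoop, solutionLoop_drain W _ _ _ _ (by rw [bridgeOf_length]; omega),
        bridgeOf_length]
      have hc : ((L.toNat : Int)) = L := Int.toNat_of_nonneg (by omega)
      omega
    | cons w ts =>
      obtain ⟨hd2, hdsub, hdp, hdb, hdsum, hdlast⟩ := bDrop_props hp hb hs
      set q1 := (bDrop L (t + 1) q cur).1 with hq1
      set cur1 := (bDrop L (t + 1) q cur).2 with hcur1
      rw [bridge_cons hL]
      simp only [solutionLoop]
      rw [show cur - wAt q (t + 1 - L) = cur1 from hd2.symm]
      by_cases hfit : cur1 + w ≤ W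
      · -- the truck enters at second t+1
        rw [if_pos hfit]
        have hagree : ∀ e : Int, t + 1 - L < e → e ≤ t →
            wAt (q1 ++ [(t + 1, w)]) e = wAt q e := by
          intro e h1 h2
          rw [wAt_snoc_ne (by omega), hdsub e (by omega)]
        have hlast : wAt (q1 ++ [(t + 1, w)]) (t + 1) = w :=
          wAt_snoc_self (fun p hp' => by have := (hdb p hp').2; omega)
        rw [bridge_shift hL q _ t w hagree hlast]
        -- B side takes the same step
        have hjump : bJump L W w q1 cur1 (t + 1) = (q1, cur1, t + 1) := by
          rw [bJump.eq_def, if_pos hfit]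
        have hB : bLoop L W (w :: ts) q cur t
            = bLoop L W ts (q1 ++ [(t + 1, w)]) (cur1 + w) (t + 1) := by
          simp only [bLoop, ← hq1, ← hcur1, hjump]
        rw [hB]
        apply ih
        · refine List.pairwise_append.2 ⟨hdp, by simp, ?_⟩
          intro a ha b hb'
          simp at hb'
          rw [hb']
          have := (hdb a ha).2
          simp only; omega
        · intro p hp'
          rcases List.mem_append.1 hp' with h | h
          · have := hdb p h
            omega
          · simp at h
            subst h
            exact ⟨by simp; omega, by simp⟩
        · simp [hdsum]
        · exact fun x hx => htr x (by simp [hx])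
        · have hgl : (q1 ++ [(t + 1, w)]).getLast? = some (t + 1, w) := by
            simp
          have hgl2 : gapF (q1 ++ [(t + 1, w)]) L (t + 1) = (t + 1 + L - (t + 1)).toNat := by
            simp [gapF, hgl]
          rw [hgl2]
          simp only [List.length_cons, Nat.succ_mul] at hf
          omega
      · -- too heavy: A wastes second t+1, B's jump skips it
        rw [if_neg hfit]
        have hq1ne : q1 ≠ [] := by
          intro h0
          rw [h0] at hdsum
          simp at hdsum
          have := htr w (by simp)
          omega
        have hlast0 : wAt q1 (t + 1) = 0 :=
          wAt_none (fun p hp' => by have := (hdb p hp').2; omega)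
        rw [bridge_shift hL q q1 t 0 (fun e h1 h2 => hdsub e (by omega)) hlast0]
        -- B side: processing the same truck from (q1, cur1, t+1) gives the same jump
        obtain ⟨⟨e1, w1⟩, r, hq1c⟩ := List.exists_cons_of_ne_nil hq1ne
        have hdpc : List.Pairwise (fun a b => a.1 < b.1) ((e1, w1) :: r) := by
          rw [← hq1c]; exact hdp
        have hr_gt : ∀ p ∈ r, e1 < p.1 := by
          intro p hp'
          exact (List.pairwise_cons.1 hdpc).1 p hp'
        have he1b : t + 1 - L < e1 := by
          have := (hdb (e1, w1) (by rw [hq1c]; simp)).1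
          simpa using this
        have hjump1 : bJump L W w q1 cur1 (t + 1) = bJump L W w r (cur1 - w1) (e1 + L) := by
          rw [hq1c, bJump.eq_def, if_neg hfit]
        have hdrop2 : bDrop L (t + 1 + 1) q1 cur1 =
            (if e1 + L ≤ t + 2 then (r, cur1 - w1) else (q1, cur1)) := by
          by_cases hc2 : e1 + L ≤ t + 2
          · rw [if_pos hc2, hq1c, bDrop, if_pos (by omega)]
            exact bDrop_stop (by intro p hp'; have := hr_gt p hp'; omega)
          · rw [if_neg hc2]
            apply bDrop_stop
            intro p hp'
            rw [hq1c] at hp'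
            rcases List.mem_cons.1 hp' with h | h
            · rw [h]; simp only; omega
            · have := hr_gt p h; omega
        have hjump2 : bJump L W w (bDrop L (t + 1 + 1) q1 cur1).1 (bDrop L (t + 1 + 1) q1 cur1).2 (t + 1 + 1)
            = bJump L W w r (cur1 - w1) (e1 + L) := by
          rw [hdrop2]
          by_cases hc2 : e1 + L ≤ t + 2
          · rw [if_pos hc2]
            have he1 : e1 + L = t + 2 := by omega
            simp only
            rw [he1, show t + 1 + 1 = t + 2 from by ring]
          · rw [if_neg hc2]
            simp only
            rw [hq1c, bJump.eq_def, if_neg hfit]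
        have hB : bLoop L W (w :: ts) q cur t = bLoop L W (w :: ts) q1 cur1 (t + 1) := by
          conv_lhs => rw [bLoop]
          conv_rhs => rw [bLoop]
          simp only [← hq1, ← hcur1, hjump1, hjump2]
        rw [hB]
        apply ih
        · exact hdp
        · intro p hp'
          have := hdb p hp'
          omega
        · exact hdsum
        · exact htr
        · -- fuel: the potential gapF dropped by exactly one
          obtain ⟨pl, hpl⟩ : ∃ pl, q.getLast? = some pl := by
            cases hql : q.getLast? with
            | none =>
              exfalso
              apply hq1ne
              have hqnil : q = [] := List.getLast?_eq_none_iff.1 hql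
              rw [hq1, hqnil]
              rfl
            | some p => exact ⟨p, rfl⟩
          have hgl1 : q1.getLast? = some pl := by rw [hdlast hq1ne, hpl]
          have hplb : t + 1 - L < pl.1 := (hdb pl (getLast?_mem hgl1)).1
          have hg1 : gapF q L t = (pl.1 + L - t).toNat := by simp [gapF, hpl]
          have hg2 : gapF q1 L (t + 1) = (pl.1 + L - (t + 1)).toNat := by simp [gapF, hgl1]
          rw [hg1] at hf
          rw [hg2]
          omega

-- ===== VERDICT (by name: the statement is the Claim_ definition above) =====
theorem solution_spec : Claim_equal_solution := by
  intro bl w tw _hdom hpre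
  unfold Spec_solution solution solution_alt
  by_cases hbl : bl ≤ 0
  · have h0 : bl.toNat = 0 := by omega
    simp [h0, hbl, solutionLoop]
  · have hL : 1 ≤ bl := by omega
    have htw : ∀ x ∈ tw, x ≤ w := hpre.resolve_left hbl
    rw [if_neg hbl, show List.replicate bl.toNat 0 = bridgeOf [] bl 0 from (bridgeOf_nil bl 0).symm]
    rw [sim w bl hL _ tw [] 0 0 (by simp) (by simp) (by simp) htw
      (by simp [gapF]; omega)]
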